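-- pv_equiv track=rewrite | github.com/hear-the-sea/luwanwu_webgame | gameplay/views/recruitment.py | _build_recruitment_categories
-- ===== SOURCE A (Python) =====
-- RECRUITMENT_CATEGORY_LABELS: dict[str, str] = {
--     "dao": "刀系",
--     "qiang": "枪系",
--     "jian": "剑系",
--     "quan": "拳系",
--     "gong": "弓系",
--     "scout": "探子",
--     "other": "其他",
-- }
--
-- def _build_recruitment_categories(available_classes: set[str]) -> list[dict[str, str]]:
--     categories: list[dict[str, str]] = [{"key": "all", "name": "全部"}]
--     ordered = ["dao", "qiang", "jian", "quan", "gong", "scout", "other"]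
--     used = {"all"}
--
--     for class_key in ordered:
--         if class_key in available_classes:
--             categories.append({"key": class_key, "name": RECRUITMENT_CATEGORY_LABELS.get(class_key, class_key)})
--             used.add(class_key)
--
--     for class_key in sorted(available_classes):
--         if class_key not in used:
--             categories.append({"key": class_key, "name": RECRUITMENT_CATEGORY_LABELS.get(class_key, class_key)})
--     return categories
-- ===== SOURCE B (Python) =====
-- RECRUITMENT_CATEGORY_LABELS: dict[str, str] = {
--     "dao": "刀系",
--     "qiang": "枪系",
--     "jian": "剑系",
--     "quan": "拳系",
--     "gong": "弓系",
--     "scout": "探子",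
--     "other": "其他",
-- }
--
-- def _build_recruitment_categories(available_classes: set[str]) -> list[dict[str, str]]:
--     ordered = ["dao", "qiang", "jian", "quan", "gong", "scout", "other"]
--     rank = {k: i for i, k in enumerate(ordered)}
--     keys = sorted((k for k in available_classes if k != "all"),
--                   key=lambda k: (rank.get(k, len(ordered)), k))
--     return [{"key": "all", "name": "全部"}] + [
--         {"key": k, "name": RECRUITMENT_CATEGORY_LABELS.get(k, k)} for k in keys
--     ]
-- ===== Notes on version B (the rewrite author's own statement) =====
-- stated objective: simpler
-- what changed: Replaces A's two sequential loops plus a 'used' bookkeeping set with a single sort of the non-'all' keys under a composite key (fixed-rank index, then name), then one map to category dicts.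
import Mathlib
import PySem

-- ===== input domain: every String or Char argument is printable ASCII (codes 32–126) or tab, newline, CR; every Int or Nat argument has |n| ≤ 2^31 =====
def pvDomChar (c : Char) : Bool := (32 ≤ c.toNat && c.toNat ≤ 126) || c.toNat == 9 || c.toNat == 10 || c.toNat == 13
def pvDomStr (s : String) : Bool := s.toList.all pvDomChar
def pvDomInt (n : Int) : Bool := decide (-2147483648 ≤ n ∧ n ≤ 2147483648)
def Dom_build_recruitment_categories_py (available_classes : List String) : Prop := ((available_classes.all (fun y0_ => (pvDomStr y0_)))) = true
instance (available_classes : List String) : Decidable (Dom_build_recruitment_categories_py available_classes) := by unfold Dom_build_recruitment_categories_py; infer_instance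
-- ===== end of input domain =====

-- B replaces A's two loops and the 'used' set by one composite-key sort (fixed rank, then name); same output, no speed claim.

-- module-level constant RECRUITMENT_CATEGORY_LABELS (shared context of A and B)
def pvLabels : PySem.Dict String String :=
  ((((((PySem.Dict.empty.insert "dao" "刀系").insert "qiang" "枪系").insert "jian"
      "剑系").insert "quan" "拳系").insert "gong" "弓系").insert "scout" "探子").insert "other" "其他"

-- ===== PORT A =====
def build_recruitment_categories_py (available_classes : List String) : List (List (String × String)) :=
  let categories : List (List (String × String)) := [[("key", "all"), ("name", "全部")]]
  let ordered : List String := ["dao", "qiang", "jian", "quan", "gong", "scout", "other"]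
  let used : PySem.Set String := PySem.Set.ofList ["all"]
  let st := ordered.foldl
    (fun st class_key =>
      if available_classes.contains class_key then
        (st.1 ++ [[("key", class_key), ("name", pvLabels.getD class_key class_key)]],
         PySem.Set.add st.2 class_key)
      else st) (categories, used)
  (PySem.List.sorted available_classes (fun x => x)).foldl
    (fun cats class_key =>
      if !PySem.Set.contains st.2 class_key then
        cats ++ [[("key", class_key), ("name", pvLabels.getD class_key class_key)]]
      else cats) st.1

-- ===== PORT B =====
def build_recruitment_categories_py_alt (available_classes : List String) : List (List (String × String)) :=
  let ordered : List String := ["dao", "qiang", "jian", "quan", "gong", "scout", "other"]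
  let rank : PySem.Dict String Int :=
    (PySem.List.enumerate ordered).foldl (fun d p => d.insert p.2 p.1) PySem.Dict.empty
  let keys := PySem.List.sorted2 (available_classes.filter (fun k => k != "all"))
      (fun k => rank.getD k (ordered.length : Int)) (fun k => k)
  [[("key", "all"), ("name", "全部")]] ++
    keys.map (fun k => [("key", k), ("name", pvLabels.getD k k)])

-- ===== PRECONDITION & SPEC =====
-- The Python parameter is a set[str]; its List model holds the set's DISTINCT elements, so
-- Pre_ states exactly that shape (no duplicates) — it excludes no input the Python A can receive.
def Pre_build_recruitment_categories_py (available_classes : List String) : Prop :=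
  available_classes.Nodup
instance (available_classes : List String) : Decidable (Pre_build_recruitment_categories_py available_classes) := by unfold Pre_build_recruitment_categories_py; infer_instance
def pvWitness_build_recruitment_categories_py : List String := ["mage", "dao", "all", "scout"]

def Spec_build_recruitment_categories_py (available_classes : List String) (out : List (List (String × String))) : Prop := out = build_recruitment_categories_py_alt available_classes
instance (available_classes : List String) (out : List (List (String × String))) : Decidable (Spec_build_recruitment_categories_py available_classes out) := by unfold Spec_build_recruitment_categories_py; infer_instance

-- ===== CLAIM (what is proved, stated in full; the proofs are below) =====
def Claim_equal_build_recruitment_categories_py : Prop := ∀ (available_classes : List String), Dom_build_recruitment_categories_py available_classes → Pre_build_recruitment_categories_py available_classes → Spec_build_recruitment_categories_py available_classes (build_recruitment_categories_py available_classes)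

-- ===== LEMMAS AND PROOFS =====

def pvOrd : List String := ["dao", "qiang", "jian", "quan", "gong", "scout", "other"]

def pvRank : PySem.Dict String Int :=
  (PySem.List.enumerate pvOrd).foldl (fun d p => d.insert p.2 p.1) PySem.Dict.empty

def pvEntry (k : String) : List (String × String) := [("key", k), ("name", pvLabels.getD k k)]

def pvKey (k : String) : Int ×ₗ String := toLex (pvRank.getD k 7, k)

-- A's first loop appends the present ordered keys and records them in 'used'
lemma pv_loop1 (av : List String) (os : List String) (cs : List (List (String × String)))
    (u : PySem.Set String) :
    os.foldl (fun st k =>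
        if av.contains k then (st.1 ++ [pvEntry k], PySem.Set.add st.2 k) else st) (cs, u)
      = (cs ++ (os.filter (fun k => av.contains k)).map pvEntry,
         PySem.Set.update u (os.filter (fun k => av.contains k))) := by
  induction os generalizing cs u with
  | nil => simp [PySem.Set.update]
  | cons k t ih =>
    by_cases h : av.contains k
    · simp only [List.foldl_cons, List.filter_cons, h, if_pos, ih, List.map_cons,
        PySem.Set.update, List.foldl_cons]
      simp
    · simp only [List.foldl_cons, List.filter_cons, h, ih]
      simp

-- the before-relation of sorted2 with keys (k1, id) is the lexicographic order on Int ×ₗ String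
lemma pv_sorted2_eq_sorted_lex (xs : List String) (k1 : String → Int) :
    PySem.List.sorted2 xs k1 (fun k => k)
      = PySem.List.sorted xs (fun k => toLex (k1 k, k)) := by
  have hb : (fun a b : String => decide (k1 a < k1 b) || (!decide (k1 b < k1 a) && decide (a < b)))
      = fun a b : String => decide (toLex (k1 a, a) < toLex (k1 b, b)) := by
    funext a b
    rcases lt_trichotomy (k1 a) (k1 b) with h | h | h
    · simp [h, Prod.Lex.lt_iff, not_lt.mpr h.le]
    · simp [h, Prod.Lex.lt_iff]
    · simp [h, Prod.Lex.lt_iff, not_lt.mpr h.le, ne_of_gt h]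
  show List.foldl (fun (acc : List String) x =>
      PySem.List.insertBy (fun a b => decide (k1 a < k1 b) || (!decide (k1 b < k1 a) && decide (a < b))) x acc) [] xs
    = List.foldl (fun (acc : List String) x =>
      PySem.List.insertBy (fun a b => decide (toLex (k1 a, a) < toLex (k1 b, b))) x acc) [] xs
  rw [hb]

lemma pv_rank_mem : ∀ a ∈ pvOrd, pvRank.getD a 7 < 7 := by decide

lemma pv_rank_not_mem (k : String) (h : k ∉ pvOrd) : pvRank.getD k 7 = 7 := by
  simp only [pvOrd, List.mem_cons, List.not_mem_nil, or_false, not_or] at h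
  obtain ⟨h1, h2, h3, h4, h5, h6, h7⟩ := h
  have e : ∀ s : String, ¬ k = s → (s == k) = false := fun s hs =>
    beq_eq_false_iff_ne.mpr (Ne.symm hs)
  simp [pvRank, PySem.Dict.getD, PySem.Dict.get?, pvOrd, PySem.List.enumerate,
    PySem.Dict.insert, PySem.Dict.empty, PySem.Dict.contains, List.find?,
    e _ h1, e _ h2, e _ h3, e _ h4, e _ h5, e _ h6, e _ h7]

lemma pv_ord_pairwise : pvOrd.Pairwise (fun a b => pvKey a < pvKey b) := by
  simp only [pvKey, Prod.Lex.lt_iff]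
  decide

-- the key list B sorts equals the key list A builds
lemma pv_keys_eq (av : List String) (hnd : av.Nodup) :
    PySem.List.sorted (av.filter (fun k => k != "all")) pvKey
      = pvOrd.filter (fun k => av.contains k)
        ++ (PySem.List.sorted av (fun x => x)).filter
             (fun k => decide (k ≠ "all" ∧ k ∉ pvOrd)) := by
  apply PySem.List.sorted_eq_of_perm_of_pairwise_lt
  · -- permutation
    have hF2 : ((PySem.List.sorted av (fun x => x)).filter
        (fun k => decide (k ≠ "all" ∧ k ∉ pvOrd))).Perm
        (av.filter (fun k => decide (k ≠ "all" ∧ k ∉ pvOrd))) :=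
      (PySem.List.sorted_perm av (fun x => x) false).filter _
    have hF1 : (pvOrd.filter (fun k => av.contains k)).Perm
        (av.filter (fun k => decide (k ∈ pvOrd))) := by
      rw [List.perm_ext_iff_of_nodup ((by decide : pvOrd.Nodup).filter _) (hnd.filter _)]
      intro a
      simp [List.mem_filter, and_comm]
    refine ((hF1.append hF2).trans ?_)
    have hsplit := List.filter_append_perm (fun k => decide (k ∈ pvOrd))
      (av.filter (fun k => k != "all"))
    rw [List.filter_filter, List.filter_filter] at hsplit
    have e1 : av.filter (fun k => decide (k ∈ pvOrd) && (k != "all"))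
        = av.filter (fun k => decide (k ∈ pvOrd)) := by
      apply List.filter_congr
      intro x _
      by_cases hx : x ∈ pvOrd
      · have : x ≠ "all" := by rintro rfl; revert hx; decide
        simp [hx, this]
      · simp [hx]
    have e2 : av.filter (fun k => !decide (k ∈ pvOrd) && (k != "all"))
        = av.filter (fun k => decide (k ≠ "all" ∧ k ∉ pvOrd)) := by
      apply List.filter_congr
      intro x _
      by_cases hx : x ∈ pvOrd <;> by_cases ha : x = "all" <;> simp [hx, ha]
    rw [e1, e2] at hsplit
    exact hsplit
  · -- pairwise strictly increasing keys
    rw [List.pairwise_append]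
    refine ⟨List.Pairwise.sublist List.filter_sublist pv_ord_pairwise, ?_, ?_⟩
    · have hperm := PySem.List.sorted_perm av (fun x => x) false
      have hs : (PySem.List.sorted av (fun x => x)).Nodup := hperm.nodup_iff.mpr hnd
      have hlt : (PySem.List.sorted av (fun x => x)).Pairwise (fun a b : String => a < b) :=
        ((PySem.List.sorted_pairwise av (fun x => x)).and hs).imp
          (fun h => lt_of_le_of_ne h.1 h.2)
      have hltf : ((PySem.List.sorted av (fun x => x)).filter
          (fun k => decide (k ≠ "all" ∧ k ∉ pvOrd))).Pairwise (fun a b : String => a < b) :=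
        List.Pairwise.sublist List.filter_sublist hlt
      refine List.Pairwise.imp_of_mem ?_ hltf
      intro a b ha hb hab
      have ha' : a ∉ pvOrd := by
        have := (List.mem_filter.mp ha).2; simp at this; exact this.2
      have hb' : b ∉ pvOrd := by
        have := (List.mem_filter.mp hb).2; simp at this; exact this.2
      simp only [pvKey, Prod.Lex.lt_iff, pv_rank_not_mem a ha', pv_rank_not_mem b hb']
      exact Or.inr ⟨rfl, hab⟩
    · intro a ha b hb
      have ha' : a ∈ pvOrd := List.mem_of_mem_filter ha
      have hb' : b ∉ pvOrd := by
        have := (List.mem_filter.mp hb).2; simp at this; exact this.2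
      simp only [pvKey, Prod.Lex.lt_iff]
      exact Or.inl (by rw [pv_rank_not_mem b hb']; exact pv_rank_mem a ha')

lemma pv_alt_eq (av : List String) :
    build_recruitment_categories_py_alt av
      = [[("key", "all"), ("name", "全部")]]
        ++ (PySem.List.sorted (av.filter (fun k => k != "all")) pvKey).map pvEntry := by
  have h0 : build_recruitment_categories_py_alt av
      = [[("key", "all"), ("name", "全部")]] ++
        (PySem.List.sorted2 (av.filter (fun k => k != "all"))
          (fun k => pvRank.getD k 7) (fun k => k)).map pvEntry := rfl
  rw [h0, pv_sorted2_eq_sorted_lex]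
  rfl

lemma pv_a_eq (av : List String) :
    build_recruitment_categories_py av
      = [[("key", "all"), ("name", "全部")]]
        ++ (pvOrd.filter (fun k => av.contains k)).map pvEntry
        ++ ((PySem.List.sorted av (fun x => x)).filter
             (fun k => !PySem.Set.contains
                (PySem.Set.update (PySem.Set.ofList ["all"])
                  (pvOrd.filter (fun k => av.contains k))) k)).map pvEntry := by
  have h0 : build_recruitment_categories_py av
      = (PySem.List.sorted av (fun x => x)).foldl
          (fun cats k =>
            if !PySem.Set.contains
                (pvOrd.foldl (fun st k =>
                    if av.contains k then (st.1 ++ [pvEntry k], PySem.Set.add st.2 k) else st)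
                  ([[("key", "all"), ("name", "全部")]], PySem.Set.ofList ["all"])).2 k
            then cats ++ [pvEntry k] else cats)
          (pvOrd.foldl (fun st k =>
              if av.contains k then (st.1 ++ [pvEntry k], PySem.Set.add st.2 k) else st)
            ([[("key", "all"), ("name", "全部")]], PySem.Set.ofList ["all"])).1 := rfl
  rw [h0, pv_loop1]
  rw [PySem.List.foldl_append_if
    (fun k => !PySem.Set.contains
      (PySem.Set.update (PySem.Set.ofList ["all"]) (pvOrd.filter (fun k => av.contains k))) k)
    pvEntry]

-- ===== VERDICT (by name: the statement is the Claim_ definition above) =====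
theorem build_recruitment_categories_py_spec : Claim_equal_build_recruitment_categories_py := by
  intro av _ hnd
  unfold Spec_build_recruitment_categories_py
  rw [pv_a_eq, pv_alt_eq, pv_keys_eq av hnd, List.map_append, List.append_assoc]
  refine congrArg _ (congrArg _ (congrArg (List.map pvEntry) (List.filter_congr ?_)))
  intro x hx
  have hxav : x ∈ av := (PySem.List.sorted_perm av (fun x => x) false).mem_iff.mp hx
  have hiff : (PySem.Set.contains (PySem.Set.update (PySem.Set.ofList ["all"])
      (pvOrd.filter (fun k => av.contains k))) x = true) ↔ (x = "all" ∨ x ∈ pvOrd) := by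
    rw [PySem.Set.contains_iff, PySem.Set.mem_update, PySem.Set.mem_ofList]
    simp only [List.mem_filter, List.mem_singleton]
    constructor
    · rintro (h | h)
      · exact Or.inl h
      · exact Or.inr h.1
    · rintro (h | h)
      · exact Or.inl h
      · exact Or.inr ⟨h, by simpa using hxav⟩
  by_cases hm : x = "all" ∨ x ∈ pvOrd
  · rw [hiff.mpr hm]
    simp only [Bool.not_true]
    symm
    rw [decide_eq_false_iff_not]
    rintro ⟨ha, hb⟩
    rcases hm with h | h
    · exact ha h
    · exact hb h
  · have h1 : PySem.Set.contains (PySem.Set.update (PySem.Set.ofList ["all"])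
        (pvOrd.filter (fun k => av.contains k))) x = false :=
      Bool.not_eq_true _ ▸ (fun h => hm (hiff.mp h))
    rw [h1]
    push Not at hm
    simp [hm.1, hm.2]
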